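-- pv_equiv track=rewrite | github.com/arnaud-ant/BigDataProject | ModelTestDirectly.py | get_maxes_amplitude
-- ===== SOURCE A (Python) =====
-- def get_maxes_amplitude(wav,sliding_window,x):
--     max_y=0
--     max_Y_X=0
--     max_Y2=0
--     for indice in range(0,sliding_window):
--         if(sliding_window+indice <= len(wav)):
--             if max_y<abs(wav[x+indice]):
--                 max_y=abs(wav[x+indice])
--                 max_Y_X=x+indice
--     for indice in range(0,sliding_window):
--         if(sliding_window+indice <= len(wav)):
--             if max_Y2<abs(wav[x+indice]) and abs(max_Y_X-(x+indice))>sliding_window*0.2: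
--                 max_Y2=abs(wav[x+indice])
--     return int(max_y),int(max_Y2)
-- ===== SOURCE B (Python) =====
-- def get_maxes_amplitude(wav, sliding_window, x):
--     # Sort-then-select: one scan of the window builds an (amplitude, index)
--     # buffer, a stable descending sort by amplitude puts the first-occurring
--     # peak at the front, and the secondary max is simply the first entry of
--     # that order lying far enough from the peak index.
--     n = len(wav)
--     buf = [(abs(wav[x + i]), x + i)
--            for i in range(sliding_window) if sliding_window + i <= n]
--     order = sorted(buf, key=lambda t: t[0], reverse=True)
--     max_y, max_Y_X = order[0] if order else (0, 0)
--     max_Y2 = next((a for a, j in order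
--                    if abs(max_Y_X - j) > sliding_window * 0.2), 0)
--     return int(max_y), int(max_Y2)
-- ===== Notes on version B (the rewrite author's own statement) =====
-- stated objective: alternative
-- what changed: B replaces A's two running-maximum loops by sort-then-select: one window scan builds an (amplitude, index) buffer, a stable descending sort by amplitude makes the peak its head, and the secondary max is the first entry of that order far enough from the peak index.
import Mathlib
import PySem

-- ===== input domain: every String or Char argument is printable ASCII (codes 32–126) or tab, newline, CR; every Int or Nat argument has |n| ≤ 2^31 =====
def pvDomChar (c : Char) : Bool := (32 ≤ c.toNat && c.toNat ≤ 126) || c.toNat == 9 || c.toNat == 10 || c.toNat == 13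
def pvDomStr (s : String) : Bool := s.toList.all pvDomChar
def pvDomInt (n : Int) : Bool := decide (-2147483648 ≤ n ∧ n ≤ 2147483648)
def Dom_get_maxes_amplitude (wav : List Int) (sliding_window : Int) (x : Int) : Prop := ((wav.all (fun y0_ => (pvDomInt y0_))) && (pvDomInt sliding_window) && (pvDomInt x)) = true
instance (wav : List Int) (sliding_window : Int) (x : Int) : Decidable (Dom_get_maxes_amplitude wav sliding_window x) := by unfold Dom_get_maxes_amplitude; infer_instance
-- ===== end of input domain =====

-- B replaces A's two running-maximum loops by sort-then-select: one window scan
-- builds an (amplitude, index) buffer, a stable descending sort by amplitude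
-- yields the peak as its head and the secondary max as the first far-enough
-- entry (objective: alternative decomposition, same practical cost).


-- ===== PORT A =====
-- Python's 'abs(max_Y_X-(x+indice)) > sliding_window*0.2' (float) is ported as the exact
-- integer test 'sliding_window < 5*|…|': for the values reached on Dom (1 ≤ sliding_window
-- ≤ 2^31, the comparison only runs inside the loop) the rounded double sliding_window*0.2
-- decides strictly-greater exactly like sliding_window/5 does.
-- Under Pre_ every accessed index is in range, so pyGetD's default 0 is never consulted
-- (outside Pre_ Python raises IndexError).
def get_maxes_amplitude (wav : List Int) (sliding_window : Int) (x : Int) : Int × Int :=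
  let p :=
    (PySem.List.pyRange 0 sliding_window 1).foldl
      (fun (acc : Int × Int) indice =>
        if sliding_window + indice ≤ PySem.List.len wav then
          if acc.1 < |PySem.List.pyGetD wav (x + indice) 0| then
            (|PySem.List.pyGetD wav (x + indice) 0|, x + indice)
          else acc
        else acc)
      (0, 0)
  let max_Y2 :=
    (PySem.List.pyRange 0 sliding_window 1).foldl
      (fun (m2 : Int) indice =>
        if sliding_window + indice ≤ PySem.List.len wav then
          if m2 < |PySem.List.pyGetD wav (x + indice) 0| ∧
              sliding_window < 5 * |p.2 - (x + indice)| then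
            |PySem.List.pyGetD wav (x + indice) 0|
          else m2
        else m2)
      0
  (p.1, max_Y2)

-- ===== PORT B =====
-- Same float-to-integer translation of '> sliding_window*0.2' as in port A.
def get_maxes_amplitude_alt (wav : List Int) (sliding_window : Int) (x : Int) : Int × Int :=
  let n := PySem.List.len wav
  let buf :=
    ((PySem.List.pyRange 0 sliding_window 1).filter
        (fun i => decide (sliding_window + i ≤ n))).map
      (fun i => (|PySem.List.pyGetD wav (x + i) 0|, x + i))
  let order := PySem.List.sorted buf (fun t => t.1) true
  let p := order.headD (0, 0)
  let max_Y2 :=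
    ((order.find? (fun t => decide (sliding_window < 5 * |p.2 - t.2|))).map
      (fun t => t.1)).getD 0
  (p.1, max_Y2)

-- ===== PRECONDITION & SPEC =====
-- Pre_ excludes exactly the inputs on which Python A raises IndexError: some executed
-- window index x+indice falls outside [-len(wav), len(wav)).
def Pre_get_maxes_amplitude (wav : List Int) (sliding_window : Int) (x : Int) : Prop :=
  sliding_window ≤ 0 ∨ (wav.length : Int) < sliding_window ∨
    (-(wav.length : Int) ≤ x ∧
      x + min (sliding_window - 1) ((wav.length : Int) - sliding_window) < (wav.length : Int))
instance (wav : List Int) (sliding_window : Int) (x : Int) : Decidable (Pre_get_maxes_amplitude wav sliding_window x) := by unfold Pre_get_maxes_amplitude; infer_instance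
def pvWitness_get_maxes_amplitude : List Int × Int × Int := ([1, -3, 2], 2, 0)
def Spec_get_maxes_amplitude (wav : List Int) (sliding_window : Int) (x : Int) (out : Int × Int) : Prop := out = get_maxes_amplitude_alt wav sliding_window x
instance (wav : List Int) (sliding_window : Int) (x : Int) (out : Int × Int) : Decidable (Spec_get_maxes_amplitude wav sliding_window x out) := by unfold Spec_get_maxes_amplitude; infer_instance

-- ===== CLAIM (what is proved, stated in full; the proofs are below) =====
def Claim_equal_get_maxes_amplitude : Prop := ∀ (wav : List Int) (sliding_window : Int) (x : Int), Dom_get_maxes_amplitude wav sliding_window x → Pre_get_maxes_amplitude wav sliding_window x → Spec_get_maxes_amplitude wav sliding_window x (get_maxes_amplitude wav sliding_window x)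

-- ===== LEMMAS AND PROOFS =====

-- A's running-argmax step, written over buffer entries.
def pvStep (m t : Int × Int) : Int × Int := if m.1 < t.1 then t else m

-- The stable descending insertion: new head is pvStep of the old head.
def pvBef (a b : Int × Int) : Bool := decide (b.1 < a.1)

lemma pvInsertBy_cons (t y : Int × Int) (ys : List (Int × Int)) :
    ∃ zs, PySem.List.insertBy pvBef t (y :: ys) = pvStep y t :: zs := by
  by_cases h : y.1 < t.1
  · exact ⟨y :: ys, by simp [PySem.List.insertBy, pvBef, pvStep, h]⟩
  · exact ⟨PySem.List.insertBy pvBef t ys, by simp [PySem.List.insertBy, pvBef, pvStep, h]⟩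

-- Head of the insertion-sort fold started at a nonempty accumulator
-- is the running argmax started at that accumulator's head.
lemma pvHead_foldl_insertBy (E : List (Int × Int)) :
    ∀ (y : Int × Int) (ys : List (Int × Int)),
      ((E.foldl (fun acc t => PySem.List.insertBy pvBef t acc) (y :: ys)).headD (0, 0))
        = E.foldl pvStep y := by
  induction E with
  | nil => intro y ys; rfl
  | cons e E ih =>
    intro y ys
    obtain ⟨zs, hz⟩ := pvInsertBy_cons e y ys
    simp only [List.foldl_cons, hz, ih]

-- Head of the stable descending sort of a nonempty buffer.
lemma pvHead_sorted (e : Int × Int) (E : List (Int × Int)) :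
    (PySem.List.sorted (e :: E) (fun t => t.1) true).headD (0, 0)
      = E.foldl pvStep e := by
  rw [PySem.List.sorted_rev_eq_foldl_insertBy]
  have hb : (fun a b : Int × Int => decide ((fun t : Int × Int => t.1) b < (fun t : Int × Int => t.1) a)) = pvBef := rfl
  simp only [List.foldl_cons, hb]
  have h1 : PySem.List.insertBy pvBef e [] = [e] := rfl
  rw [h1, pvHead_foldl_insertBy]

-- Two starts of comparable key converge once some element beats the larger one.
lemma pvFold_pair (E : List (Int × Int)) (a b : Int × Int) (hab : a.1 ≤ b.1)
    (h : ∃ t ∈ E, b.1 < t.1) :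
    E.foldl pvStep a = E.foldl pvStep b := by
  induction E generalizing a b with
  | nil => simp at h
  | cons e E ih =>
    obtain ⟨t, ht, hbt⟩ := h
    simp only [List.foldl_cons, pvStep]
    by_cases hbe : b.1 < e.1
    · have hae : a.1 < e.1 := lt_of_le_of_lt hab hbe
      simp [hae, hbe]
    · have htE : t ∈ E := by
        rcases List.mem_cons.mp ht with rfl | h'
        · exact absurd hbt hbe
        · exact h'
      by_cases hae : a.1 < e.1
      · simp only [if_pos hae, if_neg hbe]
        exact ih e b (not_lt.mp hbe) ⟨t, htE, hbt⟩
      · simp only [if_neg hae, if_neg hbe]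
        exact ih a b hab ⟨t, htE, hbt⟩

lemma pvFold_const (E : List (Int × Int)) (a : Int × Int) (h : ∀ t ∈ E, t.1 ≤ a.1) :
    E.foldl pvStep a = a := by
  induction E with
  | nil => rfl
  | cons e E ih =>
    have he : ¬ a.1 < e.1 := not_lt.mpr (h e (by simp))
    simp only [List.foldl_cons, pvStep, if_neg he]
    exact ih (fun t ht => h t (by simp [ht]))

lemma pvFold_mem (E : List (Int × Int)) (a : Int × Int) :
    E.foldl pvStep a = a ∨ E.foldl pvStep a ∈ E := by
  induction E generalizing a with
  | nil => simp
  | cons e E ih =>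
    simp only [List.foldl_cons, pvStep]
    by_cases h : a.1 < e.1
    · simp only [if_pos h]
      rcases ih e with h' | h' <;> simp [h']
    · simp only [if_neg h]
      rcases ih a with h' | h' <;> simp [h']

-- A's second loop, over any list of entries, is a max-fold over the filtered keys.
lemma pvLoop2_eq_maxFold (E : List (Int × Int)) (sw mx : Int) :
    E.foldl (fun m2 t => if m2 < t.1 ∧ sw < 5 * |mx - t.2| then t.1 else m2) 0
      = ((E.filter (fun t => decide (sw < 5 * |mx - t.2|))).map (fun t => t.1)).foldl max 0 := by
  have hcongr :
      E.foldl (fun m2 t => if m2 < t.1 ∧ sw < 5 * |mx - t.2| then t.1 else m2) 0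
        = E.foldl (fun m2 t => if sw < 5 * |mx - t.2| then max m2 t.1 else m2) 0 := by
    apply PySem.List.foldl_congr_mem
    intro acc t _
    by_cases h1 : acc < t.1 <;> by_cases h2 : sw < 5 * |mx - t.2| <;>
      simp [h1, h2, max_def] <;> omega
  rw [hcongr, PySem.List.foldl_ite_eq_foldl_filter, List.foldl_map]

-- find? is head-of-filter.
lemma pvFind?_eq_head_filter {α : Type} (p : α → Bool) (l : List α) :
    l.find? p = (l.filter p).head? := by
  induction l with
  | nil => rfl
  | cons a l ih =>
    cases h : p a
    · rw [List.find?_cons_of_neg (by simp [h]), List.filter_cons_of_neg (by simp [h]), ih]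
    · rw [List.find?_cons_of_pos h, List.filter_cons_of_pos h]
      rfl

-- Running max of a list whose elements are all at most the start.
lemma pvFoldMax_const (ys : List Int) (y : Int) (h : ∀ v ∈ ys, v ≤ y) :
    ys.foldl max y = y := by
  induction ys generalizing y with
  | nil => rfl
  | cons z zs ih =>
    have hz : max y z = y := by have := h z (by simp); omega
    simp only [List.foldl_cons, hz]
    exact ih y (fun v hv => h v (by simp [hv]))

-- A nonneg descending list: its head (default 0) is its running max from 0.
lemma pvHeadD_eq_maxFold (xs : List Int) (hnn : ∀ v ∈ xs, 0 ≤ v)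
    (hp : xs.Pairwise (fun a b => b ≤ a)) :
    xs.headD 0 = xs.foldl max 0 := by
  cases xs with
  | nil => rfl
  | cons y ys =>
    have hy : 0 ≤ y := hnn y (by simp)
    have hle : ∀ v ∈ ys, v ≤ y := (List.pairwise_cons.mp hp).1
    have hmax : max 0 y = y := by omega
    simp only [List.headD, List.foldl_cons, hmax]
    exact (pvFoldMax_const ys y hle).symm

lemma pvMapHeadD (l : List (Int × Int)) :
    ((l.head?.map (fun t : Int × Int => t.1)).getD 0) = (l.map (fun t => t.1)).headD 0 := by
  cases l <;> rfl

-- Conversion of A's loops over indices into folds over the mapped buffer.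
lemma pvMapA (L : List Int) (wav : List Int) (x : Int) (a : Int × Int) :
    L.foldl (fun (acc : Int × Int) i =>
        if acc.1 < |PySem.List.pyGetD wav (x + i) 0| then
          (|PySem.List.pyGetD wav (x + i) 0|, x + i)
        else acc) a
      = (L.map (fun i => (|PySem.List.pyGetD wav (x + i) 0|, x + i))).foldl pvStep a := by
  rw [List.foldl_map]
  rfl

lemma pvMapB (L : List Int) (wav : List Int) (x sw mx : Int) :
    L.foldl (fun (m2 : Int) i =>
        if m2 < |PySem.List.pyGetD wav (x + i) 0| ∧ sw < 5 * |mx - (x + i)| then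
          |PySem.List.pyGetD wav (x + i) 0|
        else m2) 0
      = ((L.map (fun i => (|PySem.List.pyGetD wav (x + i) 0|, x + i))).foldl
          (fun m2 t => if m2 < t.1 ∧ sw < 5 * |mx - t.2| then t.1 else m2) 0) := by
  rw [List.foldl_map]

lemma pvLoop2A_zero (E : List (Int × Int)) (Q : Int × Int → Prop) [DecidablePred Q]
    (hz : ∀ t ∈ E, t.1 ≤ 0) :
    E.foldl (fun m2 t => if m2 < t.1 ∧ Q t then t.1 else m2) 0 = 0 := by
  induction E with
  | nil => rfl
  | cons e E ih =>
    have : ¬ ((0:Int) < e.1 ∧ Q e) := fun hc => absurd hc.1 (not_lt.mpr (hz e (by simp)))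
    simp only [List.foldl_cons, if_neg this]
    exact ih (fun t ht => hz t (by simp [ht]))

-- The second components agree once the two peaks agree: A's filtered max-fold
-- over the buffer equals B's first far entry of the descending order.
lemma pvSecond_eq (buf : List (Int × Int)) (sw mx : Int)
    (hnn : ∀ t ∈ buf, 0 ≤ t.1) :
    buf.foldl (fun m2 t => if m2 < t.1 ∧ sw < 5 * |mx - t.2| then t.1 else m2) 0
      = (((PySem.List.sorted buf (fun t => t.1) true).find?
            (fun t => decide (sw < 5 * |mx - t.2|))).map (fun t => t.1)).getD 0 := by
  set order := PySem.List.sorted buf (fun t => t.1) true with horder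
  set C : Int × Int → Bool := fun t => decide (sw < 5 * |mx - t.2|) with hC
  have hperm : order.Perm buf := PySem.List.sorted_perm buf (fun t => t.1) true
  have hpermM : ((order.filter C).map (fun t => t.1)).Perm
      ((buf.filter C).map (fun t => t.1)) := (hperm.filter C).map _
  have hpw : ((order.filter C).map (fun t : Int × Int => t.1)).Pairwise (fun a b => b ≤ a) := by
    rw [List.pairwise_map]
    exact (PySem.List.sorted_pairwise_rev buf (fun t => t.1)).filter C
  have hnn' : ∀ v ∈ (order.filter C).map (fun t : Int × Int => t.1), 0 ≤ v := by
    intro v hv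
    obtain ⟨t, ht, rfl⟩ := List.mem_map.mp hv
    exact hnn t (hperm.mem_iff.mp (List.mem_of_mem_filter ht))
  rw [pvLoop2_eq_maxFold, pvFind?_eq_head_filter, pvMapHeadD,
    pvHeadD_eq_maxFold _ hnn' hpw]
  exact (hpermM.foldl_eq 0).symm

-- ===== VERDICT (by name: the statement is the Claim_ definition above) =====
theorem get_maxes_amplitude_spec : Claim_equal_get_maxes_amplitude := by
  intro wav sw x _ _
  show get_maxes_amplitude wav sw x = get_maxes_amplitude_alt wav sw x
  simp only [get_maxes_amplitude, get_maxes_amplitude_alt,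
    PySem.List.foldl_ite_eq_foldl_filter]
  set L := (PySem.List.pyRange 0 sw 1).filter
      (fun i => decide (sw + i ≤ PySem.List.len wav)) with hL
  set f := fun i => (|PySem.List.pyGetD wav (x + i) 0|, x + i) with hf
  rw [pvMapA, pvMapB]
  set buf := L.map f with hbuf
  have hnn : ∀ t ∈ buf, 0 ≤ t.1 := by
    intro t ht
    obtain ⟨i, _, rfl⟩ := List.mem_map.mp ht
    simp [hf]
  cases hb : buf with
  | nil => rfl
  | cons e E =>
    rw [hb] at hnn
    rw [pvHead_sorted]
    by_cases hex : ∃ t ∈ e :: E, 0 < t.1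
    · -- the peaks coincide as pairs
      have hpeak : (e :: E).foldl pvStep (0, 0) = E.foldl pvStep e := by
        simp only [List.foldl_cons, pvStep]
        by_cases he : (0:Int) < e.1
        · simp [he]
        · have he0 : e.1 = 0 := le_antisymm (not_lt.mp he) (hnn e (by simp))
          obtain ⟨t, ht, htpos⟩ := hex
          have htE : t ∈ E := by
            rcases List.mem_cons.mp ht with rfl | h'
            · omega
            · exact h'
          simp only [if_neg he]
          exact pvFold_pair E (0, 0) e (by omega) ⟨t, htE, by omega⟩
      rw [hpeak]
      exact congrArg _ (pvSecond_eq (e :: E) sw _ hnn)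
    · -- every amplitude is zero: both sides are (0, 0)
      have hz : ∀ t ∈ e :: E, t.1 = 0 := by
        simp only [not_exists, not_and, not_lt] at hex
        exact fun t ht => le_antisymm (hex t ht) (hnn t ht)
      have hA1 : (e :: E).foldl pvStep (0, 0) = (0, 0) :=
        pvFold_const _ _ (fun t ht => by simp [hz t ht])
      have hB1 : (E.foldl pvStep e).1 = 0 := by
        rcases pvFold_mem E e with h' | h'
        · rw [h']; exact hz e (by simp)
        · exact hz _ (List.mem_cons_of_mem e h')
      refine Prod.ext ?_ ?_
      · show ((e :: E).foldl pvStep (0, 0)).1 = (E.foldl pvStep e).1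
        simp [hA1, hB1]
      · show (e :: E).foldl
            (fun m2 t =>
              if m2 < t.1 ∧ sw < 5 * |((e :: E).foldl pvStep (0, 0)).2 - t.2| then t.1 else m2) 0
          = (((PySem.List.sorted (e :: E) (fun t => t.1) true).find?
                (fun t => decide (sw < 5 * |(E.foldl pvStep e).2 - t.2|))).map
              (fun t => t.1)).getD 0
        rw [pvLoop2A_zero (e :: E)
            (fun t => sw < 5 * |((e :: E).foldl pvStep (0, 0)).2 - t.2|)
            (fun t ht => le_of_eq (hz t ht))]
        cases hfind : (PySem.List.sorted (e :: E) (fun t => t.1) true).find?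
            (fun t => decide (sw < 5 * |(E.foldl pvStep e).2 - t.2|)) with
        | none => rfl
        | some t =>
          have ht : t ∈ e :: E :=
            (PySem.List.sorted_perm (e :: E) (fun t => t.1) true).mem_iff.mp
              (List.mem_of_find?_eq_some hfind)
          simp only [Option.map_some, Option.getD_some]
          exact (hz t ht).symm
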